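-- pv_equiv track=rewrite | github.com/Draiget/faf-re | scripts/ida/ida_vftable_rtti_dump.py | refine_owner_candidate
-- ===== SOURCE A (Python) =====
-- TRY_WITHOUT_LEADING_C = False # do not drop leading 'C' when resolving owners/files by default
--
-- def refine_owner_candidate(owner_candidate: str, known_class_names: set) -> str or None:
--     """Pick best owner from candidate using longest known-class prefix (case-insensitive).
--        If TRY_WITHOUT_LEADING_C is True, also try a version without a leading 'C'."""
--     if not owner_candidate:
--         return None
--     if owner_candidate in known_class_names:
--         return owner_candidate
--     ln = owner_candidate.lower()
--     best = None
--     for k in known_class_names: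
--         lk = k.lower()
--         if ln.startswith(lk):
--             # boundary looks like start of method (Uppercase or '_') or exact
--             if len(owner_candidate) == len(k) or owner_candidate[len(k):len(k)+1].isupper() or owner_candidate[len(k):len(k)+1] == "_":
--                 if best is None or len(k) > len(best):
--                     best = k
--     if best:
--         return best
--     if TRY_WITHOUT_LEADING_C and len(owner_candidate) >= 2 and owner_candidate[0] == 'C' and owner_candidate[1].isupper():
--         no_c = owner_candidate[1:]
--         if no_c in known_class_names:
--             return no_c
--         lnc = no_c.lower()
--         best2 = None
--         for k in known_class_names:
--             lk = k.lower()
--             if lnc.startswith(lk):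
--                 if len(no_c) == len(k) or no_c[len(k):len(k)+1].isupper() or no_c[len(k):len(k)+1] == "_":
--                     if best2 is None or len(k) > len(best2):
--                         best2 = k
--         if best2:
--             return best2
--     return None
-- ===== SOURCE B (Python) =====
-- def refine_owner_candidate(owner_candidate: str, known_class_names) -> str or None:
--     """Pick best owner from candidate using longest known-class prefix (case-insensitive).
--        Dict of lowercase->original (first-seen wins), then scan prefix lengths downward."""
--     if not owner_candidate:
--         return None
--     if owner_candidate in known_class_names:
--         return owner_candidate
--     by_lower = {}
--     for k in known_class_names:
--         lk = k.lower()
--         if lk not in by_lower: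
--             by_lower[lk] = k
--     ln = owner_candidate.lower()
--     n = len(owner_candidate)
--     max_len = max((len(s) for s in by_lower), default=0)
--     for L in range(min(n, max_len), 0, -1):
--         k = by_lower.get(ln[:L])
--         if k is not None and (L == n or owner_candidate[L].isupper() or owner_candidate[L] == "_"):
--             return k
--     return None
-- ===== Notes on version B (the rewrite author's own statement) =====
-- stated objective: idiomatic
-- what changed: A keeps a running longest-match best while scanning the known names and re-testing each as a case-insensitive prefix; B builds a lowercase->original dict once (first-seen wins) and scans the candidate's prefix lengths downward from min(len(candidate), longest known name), returning on the first dict hit with a valid boundary.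
import Mathlib
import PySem

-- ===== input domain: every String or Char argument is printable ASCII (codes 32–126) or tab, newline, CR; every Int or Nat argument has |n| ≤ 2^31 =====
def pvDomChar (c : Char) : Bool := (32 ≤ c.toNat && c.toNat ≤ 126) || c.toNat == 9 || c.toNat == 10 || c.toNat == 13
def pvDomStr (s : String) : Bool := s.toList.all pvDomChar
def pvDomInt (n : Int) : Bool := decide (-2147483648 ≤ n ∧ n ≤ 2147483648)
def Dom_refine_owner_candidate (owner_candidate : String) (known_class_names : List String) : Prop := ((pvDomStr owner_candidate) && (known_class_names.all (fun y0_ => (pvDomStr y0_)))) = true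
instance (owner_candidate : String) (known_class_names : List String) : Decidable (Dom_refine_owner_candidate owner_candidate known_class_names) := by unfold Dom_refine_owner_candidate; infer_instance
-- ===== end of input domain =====

-- B replaces A's linear scan over the known names (running longest-match best) by a
-- lowercase->name dict built once (first-seen wins) plus a scan over prefix lengths of the
-- candidate from longest down; objective: idiomatic, same result.

-- ===== PORT A =====

def TRY_WITHOUT_LEADING_C : Bool := false

-- Python str.isupper() applied to a slice of length ≤ 1 (empty string → False); exact on that domain.
def sliceIsupper (l : List Char) : Bool :=
  match l with
  | [c] => PySem.Chars.isupper c
  | _ => false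

-- the body of A's 'for k in known_class_names' loop (both occurrences in A have this shape)
def aStep (oc : List Char) (ln : List Char) (best : Option String) (k : String) : Option String :=
  let lk := PySem.Chars.lower k.toList
  if PySem.Chars.startswith ln lk then
    if (oc.length = k.toList.length)
        || sliceIsupper (PySem.Chars.slice oc (some (k.toList.length : Int)) (some ((k.toList.length : Int) + 1)))
        || (PySem.Chars.slice oc (some (k.toList.length : Int)) (some ((k.toList.length : Int) + 1)) == ['_']) then
      match best with
      | none => some k
      | some b => if b.toList.length < k.toList.length then some k else some b
    else best
  else best

def refine_owner_candidate (owner_candidate : String) (known_class_names : List String) : Option String :=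
  if owner_candidate.toList.isEmpty then none
  else if known_class_names.contains owner_candidate then some owner_candidate
  else
    let oc := owner_candidate.toList
    let ln := PySem.Chars.lower oc
    let best := known_class_names.foldl (aStep oc ln) none
    match best with
    | some b =>
      if b.toList.isEmpty then
        -- 'if best:' is false for '' → fall through to the TRY_WITHOUT_LEADING_C block
        if TRY_WITHOUT_LEADING_C
           && decide (2 ≤ oc.length)
           && (PySem.List.pyGetD oc 0 ' ' == 'C')
           && PySem.Chars.isupper (PySem.List.pyGetD oc 1 ' ') then
          -- dead in A (TRY_WITHOUT_LEADING_C = False); ported for faithfulness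
          let no_c := PySem.List.slice oc (some 1) none
          if known_class_names.contains (String.ofList no_c) then some (String.ofList no_c)
          else
            let lnc := PySem.Chars.lower no_c
            let best2 := known_class_names.foldl (aStep no_c lnc) none
            match best2 with
            | some b2 => if b2.toList.isEmpty then none else some b2
            | none => none
        else none
      else some b
    | none =>
      if TRY_WITHOUT_LEADING_C
         && decide (2 ≤ oc.length)
         && (PySem.List.pyGetD oc 0 ' ' == 'C')
         && PySem.Chars.isupper (PySem.List.pyGetD oc 1 ' ') then
        let no_c := PySem.List.slice oc (some 1) none
        if known_class_names.contains (String.ofList no_c) then some (String.ofList no_c)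
        else
          let lnc := PySem.Chars.lower no_c
          let best2 := known_class_names.foldl (aStep no_c lnc) none
          match best2 with
          | some b2 => if b2.toList.isEmpty then none else some b2
          | none => none
      else none

-- ===== PORT B =====

-- B's descending loop 'for L in range(n, 0, -1)': argument is the current L
def bLoop (oc : List Char) (ln : List Char) (n : Nat) (d : PySem.Dict (List Char) String) :
    Nat → Option String
  | 0 => none
  | L + 1 =>
    match PySem.Dict.get? d (ln.take (L + 1)) with
    | some k =>
      if (L + 1 = n)
          || (match PySem.List.pyGet? oc ((L : Int) + 1) with
              | some c => PySem.Chars.isupper c || (c == '_')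
              | none => false) then
        some k
      else bLoop oc ln n d L
    | none => bLoop oc ln n d L

def refine_owner_candidate_alt (owner_candidate : String) (known_class_names : List String) : Option String :=
  if owner_candidate.toList.isEmpty then none
  else if known_class_names.contains owner_candidate then some owner_candidate
  else
    let d := known_class_names.foldl
      (fun (d : PySem.Dict (List Char) String) k =>
        let lk := PySem.Chars.lower k.toList
        if (PySem.Dict.get? d lk).isNone then PySem.Dict.insert d lk k else d) PySem.Dict.empty
    let oc := owner_candidate.toList
    let ln := PySem.Chars.lower oc
    let max_len := d.keys.foldl (fun acc s => Nat.max acc s.length) 0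
    bLoop oc ln oc.length d (Nat.min oc.length max_len)

-- ===== PRECONDITION & SPEC =====
def Spec_refine_owner_candidate (owner_candidate : String) (known_class_names : List String) (out : Option String) : Prop := out = refine_owner_candidate_alt owner_candidate known_class_names
instance (owner_candidate : String) (known_class_names : List String) (out : Option String) : Decidable (Spec_refine_owner_candidate owner_candidate known_class_names out) := by unfold Spec_refine_owner_candidate; infer_instance

-- ===== CLAIM (what is proved, stated in full; the proofs are below) =====
def Claim_equal_refine_owner_candidate : Prop := ∀ (owner_candidate : String) (known_class_names : List String), Dom_refine_owner_candidate owner_candidate known_class_names → Spec_refine_owner_candidate owner_candidate known_class_names (refine_owner_candidate owner_candidate known_class_names)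

-- ===== LEMMAS AND PROOFS =====

-- the boundary test A applies at a prefix length M
def bndA (oc : List Char) (M : Nat) : Bool :=
  (oc.length = M)
    || sliceIsupper (PySem.Chars.slice oc (some (M : Int)) (some ((M : Int) + 1)))
    || (PySem.Chars.slice oc (some (M : Int)) (some ((M : Int) + 1)) == ['_'])

def okb (oc ln : List Char) (k : String) : Bool :=
  PySem.Chars.startswith ln (PySem.Chars.lower k.toList) && bndA oc k.toList.length

def upd (best : Option String) (k : String) : Option String :=
  match best with
  | none => some k
  | some b => if b.toList.length < k.toList.length then some k else some b

def findK (ks : List String) (s : List Char) : Option String :=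
  ks.find? (fun k => PySem.Chars.lower k.toList == s)

-- reference: B's descending scan, with the dict lookup replaced by a first-match scan
def auxR (oc ln : List Char) (ks : List String) : Nat → Option String
  | 0 => none
  | M + 1 =>
    match findK ks (ln.take (M + 1)) with
    | some k => if bndA oc (M + 1) then some k else auxR oc ln ks M
    | none => auxR oc ln ks M

-- A's post-processing of best ('if best:' with the dead TRY block removed)
def postA : Option String → Option String
  | none => none
  | some b => if b.toList.isEmpty then none else some b

theorem aStep_eq (oc ln : List Char) (best : Option String) (k : String) :
    aStep oc ln best k = if okb oc ln k then upd best k else best := by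
  simp only [aStep, okb, bndA, upd]
  cases PySem.Chars.startswith ln (PySem.Chars.lower k.toList) <;> simp

theorem lower_length (l : List Char) : (PySem.Chars.lower l).length = l.length := by
  simp [PySem.Chars.lower]

theorem bnd_eq (oc : List Char) (L : Nat) (h : L + 1 ≤ oc.length) :
    ((decide (L + 1 = oc.length))
      || (match PySem.List.pyGet? oc ((L : Int) + 1) with
          | some c => PySem.Chars.isupper c || (c == '_')
          | none => false)) = bndA oc (L + 1) := by
  have hcast : ((L : Int) + 1) = ((L + 1 : Nat) : Int) := by push_cast; ring
  by_cases hM : L + 1 = oc.length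
  · simp [bndA, hM]
  · have hlt : L + 1 < oc.length := by omega
    have hget : PySem.List.pyGet? oc ((L : Int) + 1) = some oc[L + 1] := by
      rw [hcast, PySem.List.pyGet?_natCast, List.getElem?_eq_getElem hlt]
    have hslice : PySem.Chars.slice oc (some ((L + 1 : Nat) : Int)) (some (((L + 1 : Nat) : Int) + 1))
        = [oc[L + 1]] := by
      have h1 : (((L + 1 : Nat) : Int) + 1) = ((L + 1 : Nat) : Int) + ((1 : Nat) : Int) := by push_cast; ring
      have hdrop : oc.drop (L + 1) = oc[L + 1] :: oc.drop (L + 1 + 1) := List.drop_eq_getElem_cons hlt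
      rw [PySem.Chars.slice_eq_listSlice, h1, PySem.List.slice_natCast_add, hdrop,
        List.take_succ_cons, List.take_zero]
    rw [hget]
    simp only [bndA, hslice]
    have e1 : (decide (L + 1 = oc.length)) = false := by simp [hM]
    have e2 : (decide (oc.length = L + 1)) = false := by simp; omega
    simp only [e1, e2, sliceIsupper, Bool.false_or]
    simp [List.cons_beq_cons]

theorem dict_get (ks : List String) (d : PySem.Dict (List Char) String) (s : List Char) :
    (ks.foldl
      (fun (d : PySem.Dict (List Char) String) k =>
        let lk := PySem.Chars.lower k.toList
        if (PySem.Dict.get? d lk).isNone then PySem.Dict.insert d lk k else d) d).get? s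
      = (d.get? s).or (findK ks s) := by
  induction ks generalizing d with
  | nil => simp [findK]
  | cons k t ih =>
    simp only [List.foldl_cons]
    rw [ih]
    by_cases hk : PySem.Chars.lower k.toList = s
    · subst hk
      cases hd : PySem.Dict.get? d (PySem.Chars.lower k.toList) with
      | none =>
        simp [PySem.Dict.get?_insert_self, findK, Option.or]
      | some v =>
        simp [hd, findK, Option.or]
    · have hne : s ≠ PySem.Chars.lower k.toList := fun h => hk h.symm
      have hbeq : (PySem.Chars.lower k.toList == s) = false := by
        simp only [beq_eq_false_iff_ne, ne_eq]
        exact fun h => hk h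
      have hstep : ∀ d' : PySem.Dict (List Char) String,
          (if (PySem.Dict.get? d' (PySem.Chars.lower k.toList)).isNone
            then PySem.Dict.insert d' (PySem.Chars.lower k.toList) k else d').get? s = d'.get? s := by
        intro d'
        by_cases hd' : (PySem.Dict.get? d' (PySem.Chars.lower k.toList)).isNone
        · rw [if_pos hd', PySem.Dict.get?_insert_of_ne _ _ hne]
        · rw [if_neg hd']
      simp only [hstep]
      congr 1
      simp [findK, hbeq]

theorem bLoop_eq (oc ln : List Char) (ks : List String) (L : Nat) (h : L ≤ oc.length) :
    bLoop oc ln oc.length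
      (ks.foldl
        (fun (d : PySem.Dict (List Char) String) k =>
          let lk := PySem.Chars.lower k.toList
          if (PySem.Dict.get? d lk).isNone then PySem.Dict.insert d lk k else d) PySem.Dict.empty)
      L = auxR oc ln ks L := by
  induction L with
  | zero => rfl
  | succ L ih =>
    have hd : (ks.foldl
        (fun (d : PySem.Dict (List Char) String) k =>
          let lk := PySem.Chars.lower k.toList
          if (PySem.Dict.get? d lk).isNone then PySem.Dict.insert d lk k else d)
        PySem.Dict.empty).get? (ln.take (L + 1)) = findK ks (ln.take (L + 1)) := by
      rw [dict_get]; rfl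
    have ih' := ih (by omega)
    simp only [bLoop, auxR, hd]
    cases hfind : findK ks (ln.take (L + 1)) with
    | none => exact ih'
    | some k =>
      rw [bnd_eq oc L h]
      cases bndA oc (L + 1)
      · simpa using ih'
      · simp

theorem auxR_nil (oc ln : List Char) (L : Nat) : auxR oc ln [] L = none := by
  induction L with
  | zero => rfl
  | succ L ih => simp [auxR, findK, ih]

theorem okb_spec (oc ln : List Char) (k : String) (hln : ln = PySem.Chars.lower oc)
    (h : okb oc ln k = true) :
    PySem.Chars.lower k.toList = ln.take k.toList.length ∧ k.toList.length ≤ oc.length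
      ∧ bndA oc k.toList.length = true := by
  simp only [okb, Bool.and_eq_true] at h
  obtain ⟨hsw, hbnd⟩ := h
  have hpre : PySem.Chars.lower k.toList <+: ln := (PySem.Chars.startswith_iff _ _).1 hsw
  have hlen : k.toList.length ≤ oc.length := by
    have := hpre.length_le
    rwa [lower_length, hln, lower_length] at this
  refine ⟨?_, hlen, hbnd⟩
  have := List.prefix_iff_eq_take.1 hpre
  rwa [lower_length] at this

-- a name matches the length-M prefix only when its length is M
theorem match_length (oc ln : List Char) (k : String) (M : Nat)
    (hln : ln = PySem.Chars.lower oc) (hM : M ≤ oc.length)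
    (h : PySem.Chars.lower k.toList = ln.take M) : k.toList.length = M := by
  have := congrArg List.length h
  rw [lower_length, List.length_take, hln, lower_length] at this
  omega

theorem auxR_single (oc ln : List Char) (b : String) (hln : ln = PySem.Chars.lower oc)
    (hpre : PySem.Chars.lower b.toList = ln.take b.toList.length)
    (hbnd : bndA oc b.toList.length = true) :
    ∀ L, L ≤ oc.length →
      auxR oc ln [b] L = if 1 ≤ b.toList.length ∧ b.toList.length ≤ L then some b else none := by
  intro L
  induction L with
  | zero =>
    intro _
    have hno : ¬ (1 ≤ b.toList.length ∧ b.toList.length ≤ 0) := by omega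
    rw [if_neg hno]
    rfl
  | succ L ih =>
    intro h
    by_cases hM : b.toList.length = L + 1
    · have : findK [b] (ln.take (L + 1)) = some b := by
        simp [findK, ← hM, hpre]
      simp only [auxR, this]
      rw [hM] at hbnd
      simp [hbnd, hM]
    · have hnm : (PySem.Chars.lower b.toList == ln.take (L + 1)) = false := by
        apply beq_false_of_ne
        intro hc
        exact hM (match_length oc ln b (L + 1) hln h hc)
      have : findK [b] (ln.take (L + 1)) = none := by
        simp [findK, hnm]
      simp only [auxR, this]
      rw [ih (by omega)]
      by_cases h1 : 1 ≤ b.toList.length ∧ b.toList.length ≤ L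
      · rw [if_pos h1, if_pos ⟨h1.1, by omega⟩]
      · rw [if_neg h1, if_neg (by omega)]

theorem auxR_drop (oc ln : List Char) (k : String) (xs ys : List String)
    (hln : ln = PySem.Chars.lower oc) (hk : okb oc ln k = false) :
    ∀ L, L ≤ oc.length → auxR oc ln (xs ++ k :: ys) L = auxR oc ln (xs ++ ys) L := by
  intro L
  induction L with
  | zero => intro _; rfl
  | succ L ih =>
    intro h
    have ih' := ih (by omega)
    by_cases hm : PySem.Chars.lower k.toList = ln.take (L + 1)
    · -- k matches at this level, so the boundary test must fail here
      have hlen : k.toList.length = L + 1 := match_length oc ln k (L + 1) hln h hm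
      have hsw : PySem.Chars.startswith ln (PySem.Chars.lower k.toList) = true := by
        rw [PySem.Chars.startswith_iff, hm]
        exact List.take_prefix _ _
      have hbnd : bndA oc (L + 1) = false := by
        rw [← hlen]
        by_contra hc
        have : bndA oc k.toList.length = true := by
          cases hb : bndA oc k.toList.length
          · exact absurd hb hc
          · rfl
        rw [okb, hsw, this] at hk
        simp at hk
      simp only [auxR, hbnd]
      cases findK (xs ++ k :: ys) (ln.take (L + 1)) <;>
        cases findK (xs ++ ys) (ln.take (L + 1)) <;> simp [ih']
    · have hnm : (PySem.Chars.lower k.toList == ln.take (L + 1)) = false :=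
        beq_false_of_ne hm
      have hfind : findK (xs ++ k :: ys) (ln.take (L + 1)) = findK (xs ++ ys) (ln.take (L + 1)) := by
        simp [findK, List.find?_append, hnm]
      simp only [auxR, hfind]
      cases findK (xs ++ ys) (ln.take (L + 1)) <;> simp [ih']

theorem auxR_winner (oc ln : List Char) (b k : String) (t : List String)
    (hln : ln = PySem.Chars.lower oc)
    (hb : okb oc ln b = true) (hk : okb oc ln k = true) :
    ∀ L, L ≤ oc.length → b.toList.length ≤ L → k.toList.length ≤ L →
      auxR oc ln (b :: k :: t) L
        = auxR oc ln ((if b.toList.length < k.toList.length then k else b) :: t) L := by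
  obtain ⟨hbpre, hble, hbbnd⟩ := okb_spec oc ln b hln hb
  obtain ⟨hkpre, hkle, hkbnd⟩ := okb_spec oc ln k hln hk
  intro L
  induction L with
  | zero => intro _ _ _; rfl
  | succ L ih =>
    intro h hbL hkL
    by_cases hw : b.toList.length < k.toList.length
    · rw [if_pos hw]
      by_cases hkM : k.toList.length = L + 1
      · have hfb : (PySem.Chars.lower b.toList == ln.take (L + 1)) = false := by
          apply beq_false_of_ne
          intro hc
          have := match_length oc ln b (L + 1) hln h hc
          omega
        have hfk : (PySem.Chars.lower k.toList == ln.take (L + 1)) = true := by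
          rw [← hkM]; exact beq_of_eq hkpre
        have h1 : findK (b :: k :: t) (ln.take (L + 1)) = some k := by
          simp [findK, hfb, hfk]
        have h2 : findK (k :: t) (ln.take (L + 1)) = some k := by
          simp [findK, hfk]
        rw [hkM] at hkbnd
        simp only [auxR, h1, h2, hkbnd, if_true]
      · have hfb : (PySem.Chars.lower b.toList == ln.take (L + 1)) = false := by
          apply beq_false_of_ne
          intro hc
          have := match_length oc ln b (L + 1) hln h hc
          omega
        have hfk : (PySem.Chars.lower k.toList == ln.take (L + 1)) = false := by
          apply beq_false_of_ne
          intro hc; exact hkM (match_length oc ln k (L + 1) hln h hc)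
        have h1 : findK (b :: k :: t) (ln.take (L + 1)) = findK t (ln.take (L + 1)) := by
          simp [findK, hfb, hfk]
        have h2 : findK (k :: t) (ln.take (L + 1)) = findK t (ln.take (L + 1)) := by
          simp [findK, hfk]
        have ih' := ih (by omega) (by omega) (by omega)
        rw [if_pos hw] at ih'
        simp only [auxR, h1, h2]
        cases findK t (ln.take (L + 1))
        · exact ih'
        · cases bndA oc (L + 1)
          · simpa using ih'
          · simp
    · rw [if_neg hw]
      by_cases hbM : b.toList.length = L + 1
      · have hfb : (PySem.Chars.lower b.toList == ln.take (L + 1)) = true := by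
          rw [← hbM]; exact beq_of_eq hbpre
        have h1 : findK (b :: k :: t) (ln.take (L + 1)) = some b := by
          simp [findK, hfb]
        have h2 : findK (b :: t) (ln.take (L + 1)) = some b := by
          simp [findK, hfb]
        rw [hbM] at hbbnd
        simp only [auxR, h1, h2, hbbnd, if_true]
      · have hfb : (PySem.Chars.lower b.toList == ln.take (L + 1)) = false := by
          apply beq_false_of_ne
          intro hc; exact hbM (match_length oc ln b (L + 1) hln h hc)
        have hfk : (PySem.Chars.lower k.toList == ln.take (L + 1)) = false := by
          apply beq_false_of_ne
          intro hc
          have := match_length oc ln k (L + 1) hln h hc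
          omega
        have h1 : findK (b :: k :: t) (ln.take (L + 1)) = findK t (ln.take (L + 1)) := by
          simp [findK, hfb, hfk]
        have h2 : findK (b :: t) (ln.take (L + 1)) = findK t (ln.take (L + 1)) := by
          simp [findK, hfb]
        have ih' := ih (by omega) (by omega) (by omega)
        rw [if_neg hw] at ih'
        simp only [auxR, h1, h2]
        cases findK t (ln.take (L + 1))
        · exact ih'
        · cases bndA oc (L + 1)
          · simpa using ih'
          · simp

theorem fold_auxR (oc ln : List Char) (hln : ln = PySem.Chars.lower oc) :
    ∀ (ks : List String) (best : Option String),
      (∀ b, best = some b → okb oc ln b = true) →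
      postA (ks.foldl (aStep oc ln) best) = auxR oc ln (best.toList ++ ks) oc.length := by
  intro ks
  induction ks with
  | nil =>
    intro best hb
    cases best with
    | none => simp [postA, auxR_nil]
    | some b =>
      have hok := hb b rfl
      obtain ⟨hpre, hle, hbnd⟩ := okb_spec oc ln b hln hok
      simp only [List.foldl_nil, Option.toList_some, List.cons_append, List.nil_append]
      rw [auxR_single oc ln b hln hpre hbnd oc.length le_rfl]
      by_cases h0 : b.toList.length = 0
      · have : b.toList.isEmpty = true := by
          cases hbl : b.toList
          · rfl
          · rw [hbl] at h0; simp at h0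
        simp [postA, this, h0]
      · have : b.toList.isEmpty = false := by
          cases hbl : b.toList
          · rw [hbl] at h0; simp at h0
          · rfl
        rw [if_pos ⟨by omega, hle⟩]
        simp [postA, this]
  | cons k t ih =>
    intro best hb
    simp only [List.foldl_cons]
    rw [aStep_eq]
    by_cases hk : okb oc ln k = true
    · rw [if_pos hk]
      cases best with
      | none =>
        have hhyp : ∀ b, upd none k = some b → okb oc ln b = true := by
          intro b hb'
          simp only [upd] at hb'
          injection hb' with h
          exact h ▸ hk
        have := ih (upd none k) hhyp
        simpa [upd] using this
      | some b =>
        have hbok := hb b rfl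
        have hupd : upd (some b) k
            = some (if b.toList.length < k.toList.length then k else b) := by
          simp only [upd]
          by_cases hw : b.toList.length < k.toList.length
          · rw [if_pos hw, if_pos hw]
          · rw [if_neg hw, if_neg hw]
        have hwok : okb oc ln (if b.toList.length < k.toList.length then k else b) = true := by
          by_cases hw : b.toList.length < k.toList.length
          · rw [if_pos hw]; exact hk
          · rw [if_neg hw]; exact hbok
        rw [hupd]
        have hhyp : ∀ b', some (if b.toList.length < k.toList.length then k else b) = some b'
            → okb oc ln b' = true := by
          intro b' hb'
          injection hb' with h
          exact h ▸ hwok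
        rw [ih (some (if b.toList.length < k.toList.length then k else b)) hhyp]
        simp only [Option.toList_some, List.cons_append, List.nil_append]
        exact (auxR_winner oc ln b k t hln hbok hk oc.length le_rfl
          (okb_spec oc ln b hln hbok).2.1 (okb_spec oc ln k hln hk).2.1).symm
    · rw [if_neg hk]
      rw [ih best hb]
      have hkf : okb oc ln k = false := by
        cases hko : okb oc ln k
        · rfl
        · exact absurd hko hk
      exact (auxR_drop oc ln k best.toList t hln hkf oc.length le_rfl).symm

-- every name's length is bounded by the longest dict key
theorem maxlen_bound (ks : List String) :
    ∀ k ∈ ks, k.toList.length ≤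
      ((ks.foldl
        (fun (d : PySem.Dict (List Char) String) k =>
          let lk := PySem.Chars.lower k.toList
          if (PySem.Dict.get? d lk).isNone then PySem.Dict.insert d lk k else d)
        PySem.Dict.empty).keys.foldl (fun acc s => Nat.max acc s.length) 0) := by
  intro k hk
  set d := ks.foldl
    (fun (d : PySem.Dict (List Char) String) k =>
      let lk := PySem.Chars.lower k.toList
      if (PySem.Dict.get? d lk).isNone then PySem.Dict.insert d lk k else d)
    PySem.Dict.empty with hd
  have hfind : (findK ks (PySem.Chars.lower k.toList)).isSome = true := by
    rw [findK, List.find?_isSome]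
    exact ⟨k, hk, beq_of_eq rfl⟩
  have hget : d.get? (PySem.Chars.lower k.toList) = findK ks (PySem.Chars.lower k.toList) := by
    rw [hd, dict_get]
    rfl
  have hmem : PySem.Chars.lower k.toList ∈ d.keys := by
    by_contra hmem
    rw [(PySem.Dict.get?_eq_none_iff_not_mem_keys _ _).2 hmem] at hget
    rw [← hget] at hfind
    simp at hfind
  have hle := (PySem.List.le_foldl_max_nat d.keys List.length 0).2
    (PySem.Chars.lower k.toList) hmem
  rw [lower_length] at hle
  exact hle

-- levels above every name's length never match: the scan may start at the cap
theorem auxR_cap (oc ln : List Char) (ks : List String) (maxK : Nat)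
    (hln : ln = PySem.Chars.lower oc)
    (hmax : ∀ k ∈ ks, k.toList.length ≤ maxK) :
    ∀ L, L ≤ oc.length → Nat.min oc.length maxK ≤ L →
      auxR oc ln ks L = auxR oc ln ks (Nat.min oc.length maxK) := by
  intro L
  induction L with
  | zero =>
    intro _ hmin
    have : Nat.min oc.length maxK = 0 := by omega
    rw [this]
  | succ L ih =>
    intro h hmin
    by_cases hEq : Nat.min oc.length maxK = L + 1
    · rw [hEq]
    · have hKle : maxK ≤ L := by
        rcases Nat.le_total oc.length maxK with hc | hc
        · have : Nat.min oc.length maxK = oc.length := Nat.min_eq_left hc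
          omega
        · have : Nat.min oc.length maxK = maxK := Nat.min_eq_right hc
          omega
      have hfind : findK ks (ln.take (L + 1)) = none := by
        rw [findK, List.find?_eq_none]
        intro k hk hbeq
        have hc : PySem.Chars.lower k.toList = ln.take (L + 1) := eq_of_beq hbeq
        have := match_length oc ln k (L + 1) hln h hc
        have := hmax k hk
        omega
      simp only [auxR, hfind]
      exact ih (by omega) (by omega)

-- A's tail (the 'if best:' plus the dead TRY_WITHOUT_LEADING_C block) is postA
theorem postA_match (ks : List String) (oc no_c lnc : List Char) (best : Option String) :
    (match best with
      | some b =>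
        if b.toList.isEmpty then
          if TRY_WITHOUT_LEADING_C
              && decide (2 ≤ oc.length)
              && (PySem.List.pyGetD oc 0 ' ' == 'C')
              && PySem.Chars.isupper (PySem.List.pyGetD oc 1 ' ') then
            if ks.contains (String.ofList no_c) then some (String.ofList no_c)
            else
              match ks.foldl (aStep no_c lnc) none with
              | some b2 => if b2.toList.isEmpty then none else some b2
              | none => none
          else none
        else some b
      | none =>
        if TRY_WITHOUT_LEADING_C
            && decide (2 ≤ oc.length)
            && (PySem.List.pyGetD oc 0 ' ' == 'C')
            && PySem.Chars.isupper (PySem.List.pyGetD oc 1 ' ') then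
          if ks.contains (String.ofList no_c) then some (String.ofList no_c)
          else
            match ks.foldl (aStep no_c lnc) none with
            | some b2 => if b2.toList.isEmpty then none else some b2
            | none => none
        else none) = postA best := by
  cases best with
  | none => simp [TRY_WITHOUT_LEADING_C, postA]
  | some b =>
    cases hbe : b.toList.isEmpty <;> simp [TRY_WITHOUT_LEADING_C, postA, hbe]

-- ===== VERDICT (by name: the statement is the Claim_ definition above) =====
theorem refine_owner_candidate_spec : Claim_equal_refine_owner_candidate := by
  intro owner_candidate known_class_names _hdom
  unfold Spec_refine_owner_candidate refine_owner_candidate refine_owner_candidate_alt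
  by_cases h1 : owner_candidate.toList.isEmpty
  · simp [h1]
  · simp only [h1, Bool.false_eq_true, if_false]
    by_cases h2 : owner_candidate ∈ known_class_names
    · simp [h2]
    · have h2c : known_class_names.contains owner_candidate = false := by
        simp [h2]
      simp only [h2c, Bool.false_eq_true, if_false]
      rw [postA_match, bLoop_eq _ _ _ _ (Nat.min_le_left _ _),
        fold_auxR owner_candidate.toList (PySem.Chars.lower owner_candidate.toList) rfl
          known_class_names none (by intro b hb; cases hb)]
      exact auxR_cap owner_candidate.toList (PySem.Chars.lower owner_candidate.toList)
        known_class_names _ rfl (maxlen_bound known_class_names) owner_candidate.toList.length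
        le_rfl (Nat.min_le_left _ _)
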